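-- pv_equiv track=rewrite | github.com/TheAtomicGoose/karan | solutions/numbers/happyNums.py | findHappyNums
-- ===== SOURCE A (Python) =====
-- def findHappyNums(x):
--
--     i = 0
--     happyNums = []
--     currentNum = 1
--
--     # While fewer than x happy numbers have been found
--     while i < x:
--
--         copyNum = currentNum
--
--         for y in range(20):
--             copyNum = happyIterate(copyNum)
--
--         if copyNum == 1:
--             happyNums.append(currentNum)
--             i += 1
--
--         currentNum += 1
--
--     return happyNums
--
-- def happyIterate(num):
--
--     numDigits = len(str(num))
--     sumSquares = 0
--
--     # For each digit in num, square it and add it to sumSquares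
--     for x in range(numDigits):
--         sumSquares += (num % 10) ** 2
--         num //= 10
--
--     return sumSquares
-- ===== SOURCE B (Python) =====
-- def findHappyNums(x):
--     happyNums = []
--     currentNum = 1
--     while len(happyNums) < x:
--         v = currentNum
--         # reduce to a single digit instead of running a fixed 20 iterations
--         while v > 9:
--             v = sumSquareDigits(v)
--         if v in (1, 7):  # the only happy single-digit values
--             happyNums.append(currentNum)
--         currentNum += 1
--     return happyNums
--
-- def sumSquareDigits(num):
--     s = 0
--     while num:
--         s += (num % 10) ** 2
--         num //= 10
--     return s
-- ===== Notes on version B (the rewrite author's own statement) =====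
-- stated objective: faster
-- what changed: B replaces A's fixed twenty applications of a str()-based digit-square-sum per candidate with a while-loop that reduces the candidate to a single digit (happy iff it ends at one or seven) and sums squared digits by pure arithmetic without converting to a string.
import Mathlib
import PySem

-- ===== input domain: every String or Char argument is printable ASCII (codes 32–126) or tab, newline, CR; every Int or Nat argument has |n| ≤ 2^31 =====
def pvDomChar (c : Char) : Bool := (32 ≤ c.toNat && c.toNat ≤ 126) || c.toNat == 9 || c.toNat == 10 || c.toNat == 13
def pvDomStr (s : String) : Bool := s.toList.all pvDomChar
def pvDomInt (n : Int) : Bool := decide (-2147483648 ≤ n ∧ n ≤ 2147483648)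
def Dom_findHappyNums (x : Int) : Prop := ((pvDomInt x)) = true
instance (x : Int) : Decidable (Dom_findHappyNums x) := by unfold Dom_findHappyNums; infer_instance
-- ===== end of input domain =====

-- B replaces A's fixed 20 str()-based digit-square-sum iterations per candidate by a
-- reduce-to-single-digit loop (happy iff it ends at 1 or 7) with arithmetic digit extraction;
-- measurably faster by a constant factor.

-- ===== PORT A =====
-- happyIterate: numDigits = len(str(num)); loop 'for x in range(numDigits)' summing (num%10)**2
def happyIterate (num : Int) : Int :=
  let numDigits := PySem.Str.len (PySem.Int.toStr num)
  ((PySem.List.pyRange 0 numDigits 1).foldl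
      (fun (st : Int × Int) _ => (st.1 + (PySem.Int.mod st.2 10) ^ 2, PySem.Int.floordiv st.2 10))
      (0, num)).1

-- the 'while i < x' loop; fuel is only a totality guard (generous: ~1000 candidates per
-- requested happy number; happy numbers are far denser than that)
def findHappyNumsLoop (fuel : Nat) (i x currentNum : Int) (happyNums : List Int) : List Int :=
  match fuel with
  | 0 => happyNums
  | f + 1 =>
    if i < x then
      let copyNum := (PySem.List.pyRange 0 20 1).foldl (fun c _ => happyIterate c) currentNum
      if copyNum = 1 then findHappyNumsLoop f (i + 1) x (currentNum + 1) (happyNums ++ [currentNum])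
      else findHappyNumsLoop f i x (currentNum + 1) happyNums
    else happyNums

def findHappyNums (x : Int) : List Int :=
  findHappyNumsLoop (1000 * (x.toNat + 1)) 0 x 1 []

-- ===== PORT B =====
-- 's = 0; while num: s += (num%10)**2; num //= 10' — guard written as 0 < num (exact on the
-- nonnegative values it is called with) so the recursion is structurally decreasing
def sumSquareDigitsGo (num s : Int) : Int :=
  if h : 0 < num then
    sumSquareDigitsGo (PySem.Int.floordiv num 10) (s + (PySem.Int.mod num 10) ^ 2)
  else s
termination_by num.toNat
decreasing_by
  have h10 : PySem.Int.floordiv num 10 = num / 10 := PySem.Int.floordiv_eq_ediv_of_pos (by omega)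
  rw [h10]; omega

def sumSquareDigits (num : Int) : Int := sumSquareDigitsGo num 0

-- 'while v > 9: v = sumSquareDigits(v)'; fuel is only a totality guard (always sufficient)
def reduceLoop (fuel : Nat) (v : Int) : Int :=
  match fuel with
  | 0 => v
  | f + 1 => if 9 < v then reduceLoop f (sumSquareDigits v) else v

def findHappyNumsAltLoop (fuel : Nat) (x currentNum : Int) (happyNums : List Int) : List Int :=
  match fuel with
  | 0 => happyNums
  | f + 1 =>
    if (happyNums.length : Int) < x then
      let v := reduceLoop (currentNum.toNat + 30) currentNum
      if v = 1 ∨ v = 7 then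
        findHappyNumsAltLoop f x (currentNum + 1) (happyNums ++ [currentNum])
      else findHappyNumsAltLoop f x (currentNum + 1) happyNums
    else happyNums

def findHappyNums_alt (x : Int) : List Int :=
  findHappyNumsAltLoop (1000 * (x.toNat + 1)) x 1 []

-- ===== PRECONDITION & SPEC =====
def Spec_findHappyNums (x : Int) (out : List Int) : Prop := out = findHappyNums_alt x
instance (x : Int) (out : List Int) : Decidable (Spec_findHappyNums x out) := by unfold Spec_findHappyNums; infer_instance

-- ===== CLAIM (what is proved, stated in full; the proofs are below) =====
def Claim_equal_findHappyNums : Prop := ∀ (x : Int), Dom_findHappyNums x → Spec_findHappyNums x (findHappyNums x)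

-- ===== LEMMAS AND PROOFS =====

-- Reference digit-square-sum on Nat, fuel-structural so the kernel can evaluate it
def Sgo : Nat → Nat → Nat
  | 0, _ => 0
  | f + 1, n => if n = 0 then 0 else (n % 10) ^ 2 + Sgo f (n / 10)

def S (n : Nat) : Nat := Sgo n n

theorem Sgo_zero : ∀ g, Sgo g 0 = 0 := by
  intro g; cases g <;> simp [Sgo]

theorem Sgo_congr : ∀ (f g n : Nat), n ≤ f → n ≤ g → Sgo f n = Sgo g n := by
  intro f
  induction f with
  | zero =>
    intro g n hf _
    have : n = 0 := by omega
    subst this; simp [Sgo_zero]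
  | succ f ih =>
    intro g n hf hg
    cases g with
    | zero =>
      have : n = 0 := by omega
      subst this; rw [Sgo_zero, Sgo_zero]
    | succ g =>
      by_cases hn : n = 0
      · subst hn; rw [Sgo_zero, Sgo_zero]
      · have hd : n / 10 < n := Nat.div_lt_self (by omega) (by omega)
        simp only [Sgo, if_neg hn]
        rw [ih g (n / 10) (by omega) (by omega)]

theorem S_step (n : Nat) (h : n ≠ 0) : S n = (n % 10) ^ 2 + S (n / 10) := by
  cases n with
  | zero => contradiction
  | succ m =>
    have hd : (m + 1) / 10 < m + 1 := Nat.div_lt_self (by omega) (by omega)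
    show Sgo (m + 1) (m + 1) = _
    simp only [Sgo, if_neg (by omega : ¬ m + 1 = 0)]
    rw [Sgo_congr m ((m+1)/10) ((m+1)/10) (by omega) (le_refl _)]
    rfl

theorem S_zero : S 0 = 0 := rfl

-- digit bound
theorem S_le_of_lt_pow : ∀ (k n : Nat), n < 10 ^ k → S n ≤ 81 * k := by
  intro k
  induction k with
  | zero =>
    intro n h
    have : n = 0 := by simpa using h
    simp [this, S_zero]
  | succ k ih =>
    intro n h
    by_cases hn : n = 0
    · simp [hn, S_zero]
    · rw [S_step n hn]
      have h1 : n / 10 < 10 ^ k := by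
        rw [Nat.div_lt_iff_lt_mul (by omega)]
        calc n < 10 ^ (k + 1) := h
        _ = 10 ^ k * 10 := by ring
      have h2 : S (n / 10) ≤ 81 * k := ih _ h1
      have h3 : (n % 10) ^ 2 ≤ 81 := by
        have : n % 10 ≤ 9 := by omega
        calc (n % 10) ^ 2 ≤ 9 ^ 2 := Nat.pow_le_pow_left this 2
        _ = 81 := by norm_num
      omega

theorem S_le_162 : ∀ n, n < 100 → S n ≤ 162 := by decide

set_option maxRecDepth 100000 in
theorem S_lt_base : ∀ n, n < 244 → 100 ≤ n → S n < n := by decide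

theorem S_lt_self : ∀ n, 100 ≤ n → S n < n := by
  intro n
  induction n using Nat.strong_induction_on with
  | _ n ih =>
    intro h
    have hstep : S n = (n % 10) ^ 2 + S (n / 10) := S_step n (by omega)
    have hsq : (n % 10) ^ 2 ≤ 81 := by
      have : n % 10 ≤ 9 := by omega
      calc (n % 10) ^ 2 ≤ 9 ^ 2 := Nat.pow_le_pow_left this 2
      _ = 81 := by norm_num
    by_cases hd : n / 10 < 100
    · by_cases hb : n < 244
      · exact S_lt_base n hb h
      · have := S_le_162 (n / 10) hd
        omega
    · have hd10 : n / 10 < n := Nat.div_lt_self (by omega) (by omega)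
      have := ih (n / 10) hd10 (by omega)
      omega

theorem S_pos : ∀ n, 1 ≤ n → 1 ≤ S n := by
  intro n
  induction n using Nat.strong_induction_on with
  | _ n ih =>
    intro h
    rw [S_step n (by omega)]
    by_cases hm : n % 10 = 0
    · have hd10 : n / 10 < n := Nat.div_lt_self (by omega) (by omega)
      have hd1 : 1 ≤ n / 10 := by omega
      have := ih (n / 10) hd10 hd1
      omega
    · have : 1 ≤ (n % 10) ^ 2 := Nat.one_le_pow _ _ (by omega)
      omega

-- reference reduction loop on Nat
def Rf : Nat → Nat → Nat
  | 0, n => n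
  | f + 1, n => if 9 < n then Rf f (S n) else n

theorem Rf_of_le (b : Nat) : ∀ n, n ≤ 9 → Rf b n = n := by
  intro n h
  cases b with
  | zero => rfl
  | succ b => simp only [Rf, if_neg (by omega : ¬ 9 < n)]

theorem Rf_comp : ∀ (a b n : Nat), Rf (a + b) n = Rf b (Rf a n) := by
  intro a
  induction a with
  | zero => intro b n; rw [Nat.zero_add]; rfl
  | succ a ih =>
    intro b n
    by_cases h : 9 < n
    · have h1 : a + 1 + b = (a + b) + 1 := by omega
      rw [h1]
      simp only [Rf, if_pos h]
      exact ih b (S n)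
    · have h1 : a + 1 + b = (a + b) + 1 := by omega
      rw [h1]
      simp only [Rf, if_neg h]
      rw [Rf_of_le b n (by omega)]

theorem Rf_eq_of_adequate {a b n : Nat} (h : Rf a n ≤ 9) (hab : a ≤ b) : Rf b n = Rf a n := by
  have h1 : b = a + (b - a) := by omega
  rw [h1, Rf_comp, Rf_of_le _ _ h]

theorem Rf_eq_of_both {a b n : Nat} (ha : Rf a n ≤ 9) (hb : Rf b n ≤ 9) : Rf a n = Rf b n := by
  rcases le_total a b with h | h
  · rw [Rf_eq_of_adequate ha h]
  · rw [Rf_eq_of_adequate hb h]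

set_option maxRecDepth 400000 in
theorem Rf30_base : ∀ n, n < 244 → Rf 30 n ≤ 9 := by decide

theorem Rf_adequate : ∀ (f n : Nat), n ≤ 162 + f → Rf (30 + f) n ≤ 9 := by
  intro f
  induction f with
  | zero => intro n h; exact Rf30_base n (by omega)
  | succ f ih =>
    intro n h
    by_cases hn : n ≤ 162 + f
    · have h9 := ih n hn
      rw [Rf_eq_of_adequate h9 (by omega)]
      exact h9
    · have hn163 : n = 163 + f := by omega
      have h1 : 30 + (f + 1) = (30 + f) + 1 := by omega
      rw [h1]
      simp only [Rf, if_pos (by omega : 9 < n)]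
      have hlt : S n < n := S_lt_self n (by omega)
      exact ih (S n) (by omega)

def Rstar (n : Nat) : Nat := Rf (n + 30) n

theorem Rstar_le9 (n : Nat) : Rstar n ≤ 9 := by
  unfold Rstar
  rw [show n + 30 = 30 + n from by omega]
  exact Rf_adequate n n (by omega)

theorem Rstar_step : ∀ n, 10 ≤ n → Rstar n = Rstar (S n) := by
  intro n h
  have h1 : Rstar n = Rf (n + 29) (S n) := by
    unfold Rstar
    rw [show n + 30 = (n + 29) + 1 from by omega]
    simp only [Rf, if_pos (by omega : 9 < n)]
  have h2 : Rf (n + 29) (S n) ≤ 9 := by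
    have hb : S n ≤ 162 + (n - 1) := by
      by_cases hc : n < 100
      · have := S_le_162 n hc; omega
      · have := S_lt_self n (by omega); omega
    have := Rf_adequate (n - 1) (S n) hb
    rwa [show 30 + (n - 1) = n + 29 from by omega] at this
  rw [h1]
  exact Rf_eq_of_both h2 (Rstar_le9 (S n))

def H (n : Nat) : Prop := Rstar n = 1 ∨ Rstar n = 7

set_option maxRecDepth 400000 in
theorem Hstep_small : ∀ n, 1 ≤ n → n < 10 →
    ((Rstar n = 1 ∨ Rstar n = 7) ↔ (Rstar (S n) = 1 ∨ Rstar (S n) = 7)) := by decide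

theorem Hstep (n : Nat) (h : 1 ≤ n) : H n ↔ H (S n) := by
  by_cases h10 : 10 ≤ n
  · unfold H; rw [Rstar_step n h10]
  · exact Hstep_small n h (by omega)

theorem H_iter : ∀ (k n : Nat), 1 ≤ n → ((H n ↔ H (S^[k] n)) ∧ 1 ≤ S^[k] n) := by
  intro k
  induction k with
  | zero => intro n h; exact ⟨Iff.rfl, h⟩
  | succ k ih =>
    intro n h
    have hs : 1 ≤ S n := S_pos n h
    have := ih (S n) hs
    rw [Function.iterate_succ_apply]
    exact ⟨(Hstep n h).trans this.1, this.2⟩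

set_option maxRecDepth 1000000 in
theorem happy_small : ∀ m, m < 244 → 1 ≤ m →
    ((Rf 30 m = 1 ∨ Rf 30 m = 7) → S^[17] m = 1) := by decide

theorem H_one : H 1 := by unfold H Rstar; decide

-- the crux: for candidates below 10^13, A's 20-step test agrees with B's reduction test
theorem main_nat : ∀ n, 1 ≤ n → n < 10000000000000 → (S^[20] n = 1 ↔ H n) := by
  intro n h1 h2
  constructor
  · intro h20
    have := (H_iter 20 n h1).1
    rw [h20] at this
    exact this.mpr H_one
  · intro hH
    have hp13 : (10:Nat) ^ 13 = 10000000000000 := by norm_num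
    have hp4 : (10:Nat) ^ 4 = 10000 := by norm_num
    have hp3 : (10:Nat) ^ 3 = 1000 := by norm_num
    have b1 : S n ≤ 1053 := by
      have := S_le_of_lt_pow 13 n (by omega); omega
    have b2 : S (S n) ≤ 324 := by
      have := S_le_of_lt_pow 4 (S n) (by omega); omega
    have b3 : S (S (S n)) ≤ 243 := by
      have := S_le_of_lt_pow 3 (S (S n)) (by omega); omega
    have hit : S^[3] n = S (S (S n)) := rfl
    have h3 : H (S^[3] n) := (H_iter 3 n h1).1.mp hH
    have p3 : 1 ≤ S^[3] n := (H_iter 3 n h1).2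
    have hboth : Rf 30 (S^[3] n) = Rf (S^[3] n + 30) (S^[3] n) :=
      Rf_eq_of_both (Rf30_base _ (by rw [hit]; omega)) (Rstar_le9 (S^[3] n))
    have h30 : Rf 30 (S^[3] n) = 1 ∨ Rf 30 (S^[3] n) = 7 := by
      unfold H Rstar at h3
      rw [hboth]
      exact h3
    have h17 := happy_small (S^[3] n) (by rw [hit]; omega) p3 h30
    calc S^[20] n = S^[17] (S^[3] n) := by
          rw [← Function.iterate_add_apply]
      _ = 1 := h17

-- ---- Int ↔ Nat bridges ----

theorem toDigitsCore_acc_le : ∀ (f n : Nat) (acc : List Char),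
    acc.length ≤ (Nat.toDigitsCore 10 f n acc).length := by
  intro f
  induction f with
  | zero => intro n acc; simp [Nat.toDigitsCore]
  | succ f ih =>
    intro n acc
    simp only [Nat.toDigitsCore]
    by_cases h : n / 10 = 0
    · simp [h]
    · simp only [if_neg h]
      have := ih (n / 10) (Nat.digitChar (n % 10) :: acc)
      simp at this
      omega

theorem toDigitsCore_lb : ∀ (f n : Nat) (acc : List Char), n < 10 ^ f →
    n < 10 ^ ((Nat.toDigitsCore 10 f n acc).length - acc.length) := by
  intro f
  induction f with
  | zero =>
    intro n acc h
    simp only [pow_zero] at h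
    have : n = 0 := by omega
    subst this
    positivity
  | succ f ih =>
    intro n acc h
    simp only [Nat.toDigitsCore]
    by_cases h0 : n / 10 = 0
    · simp only [if_pos h0, List.length_cons]
      have : n < 10 := by omega
      simpa using this
    · simp only [if_neg h0]
      have hd : n / 10 < 10 ^ f := by
        rw [Nat.div_lt_iff_lt_mul (by omega)]
        calc n < 10 ^ (f + 1) := h
        _ = 10 ^ f * 10 := by ring
      have hrec := ih (n / 10) (Nat.digitChar (n % 10) :: acc) hd
      have hmono := toDigitsCore_acc_le f (n / 10) (Nat.digitChar (n % 10) :: acc)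
      simp only [List.length_cons] at hrec hmono
      set L := (Nat.toDigitsCore 10 f (n / 10) (Nat.digitChar (n % 10) :: acc)).length with hL
      have hdiff : L - acc.length = (L - (acc.length + 1)) + 1 := by omega
      rw [hdiff, pow_succ]
      have : n < (n / 10 + 1) * 10 := by omega
      calc n < (n / 10 + 1) * 10 := this
      _ ≤ 10 ^ (L - (acc.length + 1)) * 10 := by
            have : n / 10 + 1 ≤ 10 ^ (L - (acc.length + 1)) := hrec
            exact Nat.mul_le_mul_right 10 this

theorem lt_pow_toDigits_len (n : Nat) : n < 10 ^ (Nat.toDigits 10 n).length := by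
  have h1 : n < 10 ^ (n + 1) := by
    calc n < 2 ^ n := Nat.lt_two_pow_self
    _ ≤ 10 ^ n := Nat.pow_le_pow_left (by omega) n
    _ ≤ 10 ^ (n + 1) := Nat.pow_le_pow_right (by omega) (by omega)
  have := toDigitsCore_lb (n + 1) n [] h1
  simpa [Nat.toDigits] using this

theorem foldl_const {α β : Type} (g : α → α) :
    ∀ (xs : List β) (init : α), xs.foldl (fun st _ => g st) init = g^[xs.length] init := by
  intro xs
  induction xs with
  | nil => intro init; rfl
  | cons x xs ih =>
    intro init
    simp only [List.foldl_cons, List.length_cons, ih]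
    rw [Function.iterate_succ_apply]

theorem gfold_eq : ∀ (d : Nat) (s m : Int), 0 ≤ m → m.toNat < 10 ^ d →
    ((fun (st : Int × Int) => (st.1 + (PySem.Int.mod st.2 10) ^ 2, PySem.Int.floordiv st.2 10))^[d]
      (s, m)).1 = s + (S m.toNat : Int) := by
  intro d
  induction d with
  | zero =>
    intro s m hm hb
    have : m.toNat = 0 := by simpa using hb
    simp [Function.iterate_zero, this, S_zero]
  | succ d ih =>
    intro s m hm hb
    have hcast : m = ((m.toNat : Nat) : Int) := (Int.toNat_of_nonneg hm).symm
    rw [hcast]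
    have hmod : PySem.Int.mod ((m.toNat : Nat) : Int) 10 = ((m.toNat % 10 : Nat) : Int) := by
      exact_mod_cast PySem.Int.mod_natCast m.toNat 10
    have hfdiv : PySem.Int.floordiv ((m.toNat : Nat) : Int) 10 = ((m.toNat / 10 : Nat) : Int) := by
      exact_mod_cast PySem.Int.floordiv_natCast m.toNat 10
    rw [Function.iterate_succ_apply]
    simp only [hmod, hfdiv]
    have hd : (((m.toNat / 10 : Nat) : Int)).toNat < 10 ^ d := by
      simp only [Int.toNat_natCast]
      rw [Nat.div_lt_iff_lt_mul (by omega)]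
      calc m.toNat < 10 ^ (d + 1) := hb
      _ = 10 ^ d * 10 := by ring
    have hrec := ih (s + ((m.toNat % 10 : Nat) : Int) ^ 2) ((m.toNat / 10 : Nat) : Int)
      (Int.natCast_nonneg _) hd
    rw [hrec]
    simp only [Int.toNat_natCast]
    by_cases h0 : m.toNat = 0
    · simp [h0, S_zero]
    · rw [S_step m.toNat h0]
      push_cast
      ring

theorem happyIterate_eq (n : Int) (h : 0 ≤ n) : happyIterate n = (S n.toNat : Int) := by
  simp only [happyIterate]
  have hlen : PySem.Str.len (PySem.Int.toStr n) = ((Nat.toDigits 10 n.toNat).length : Int) := by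
    rw [PySem.Str.len_eq, PySem.Int.toList_toStr]
    unfold PySem.Int.toChars
    rw [if_neg (by omega : ¬ n < 0)]
  rw [hlen]
  rw [foldl_const]
  rw [PySem.List.length_pyRange_one]
  have hL : ((((Nat.toDigits 10 n.toNat).length : Int)) - 0).toNat = (Nat.toDigits 10 n.toNat).length := by
    simp
  rw [hL]
  have := gfold_eq (Nat.toDigits 10 n.toNat).length 0 n h (lt_pow_toDigits_len n.toNat)
  rw [this]
  ring

theorem happyIterate_iter_eq : ∀ (k : Nat) (n : Int), 0 ≤ n →
    happyIterate^[k] n = ((S^[k] n.toNat : Nat) : Int) := by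
  intro k
  induction k with
  | zero =>
    intro n h
    simp [Int.toNat_of_nonneg h]
  | succ k ih =>
    intro n h
    rw [Function.iterate_succ_apply, Function.iterate_succ_apply]
    rw [happyIterate_eq n h]
    rw [ih _ (Int.natCast_nonneg _)]
    simp

theorem sumSquareDigitsGo_nat : ∀ (t : Nat), ∀ (s : Int),
    sumSquareDigitsGo (t : Int) s = s + (S t : Int) := by
  intro t
  induction t using Nat.strong_induction_on with
  | _ t ih =>
    intro s
    by_cases h0 : t = 0
    · subst h0
      rw [sumSquareDigitsGo]
      rw [dif_neg (by norm_num)]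
      simp [S_zero]
    · rw [sumSquareDigitsGo]
      rw [dif_pos (by exact_mod_cast Nat.pos_of_ne_zero h0)]
      have hmod : PySem.Int.mod ((t : Nat) : Int) 10 = ((t % 10 : Nat) : Int) := by
        exact_mod_cast PySem.Int.mod_natCast t 10
      have hfdiv : PySem.Int.floordiv ((t : Nat) : Int) 10 = ((t / 10 : Nat) : Int) := by
        exact_mod_cast PySem.Int.floordiv_natCast t 10
      rw [hmod, hfdiv]
      rw [ih (t / 10) (Nat.div_lt_self (by omega) (by omega))]
      rw [S_step t h0]
      push_cast
      ring

theorem sumSquareDigits_eq (num : Int) (h : 0 ≤ num) :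
    sumSquareDigits num = (S num.toNat : Int) := by
  unfold sumSquareDigits
  conv_lhs => rw [← Int.toNat_of_nonneg h]
  rw [sumSquareDigitsGo_nat]
  simp

theorem reduceLoop_eq : ∀ (f : Nat) (v : Int), 0 ≤ v → reduceLoop f v = (Rf f v.toNat : Int) := by
  intro f
  induction f with
  | zero => intro v h; simp [reduceLoop, Rf, Int.toNat_of_nonneg h]
  | succ f ih =>
    intro v h
    simp only [reduceLoop, Rf]
    by_cases h9 : 9 < v
    · rw [if_pos h9, if_pos (by omega : 9 < v.toNat)]
      rw [sumSquareDigits_eq v h]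
      rw [ih _ (Int.natCast_nonneg _)]
      simp
    · rw [if_neg h9, if_neg (by omega : ¬ 9 < v.toNat)]
      exact (Int.toNat_of_nonneg h).symm

-- the two candidate tests agree
theorem tests_agree (n : Int) (h1 : 1 ≤ n) (h2 : n < 10000000000000) :
    (((PySem.List.pyRange 0 20 1).foldl (fun c _ => happyIterate c) n = 1) ↔
      (reduceLoop (n.toNat + 30) n = 1 ∨ reduceLoop (n.toNat + 30) n = 7)) := by
  have hfold : (PySem.List.pyRange 0 20 1).foldl (fun c _ => happyIterate c) n
      = happyIterate^[20] n := by
    rw [foldl_const]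
    congr 1
  rw [hfold, happyIterate_iter_eq 20 n (by omega)]
  rw [reduceLoop_eq _ n (by omega)]
  have hn1 : 1 ≤ n.toNat := by omega
  have hn2 : n.toNat < 10000000000000 := by omega
  have hmain := main_nat n.toNat hn1 hn2
  unfold H Rstar at hmain
  constructor
  · intro hA
    have : S^[20] n.toNat = 1 := by exact_mod_cast hA
    rcases hmain.mp this with h | h
    · left; exact_mod_cast h
    · right; exact_mod_cast h
  · intro hB
    have : Rf (n.toNat + 30) n.toNat = 1 ∨ Rf (n.toNat + 30) n.toNat = 7 := by
      rcases hB with h | h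
      · left; exact_mod_cast h
      · right; exact_mod_cast h
    have := hmain.mpr this
    exact_mod_cast this

theorem loops_eq : ∀ (fuel : Nat) (x i cur : Int) (acc : List Int),
    1 ≤ cur → i = (acc.length : Int) → cur.toNat + fuel ≤ 10000000000000 →
    findHappyNumsLoop fuel i x cur acc = findHappyNumsAltLoop fuel x cur acc := by
  intro fuel
  induction fuel with
  | zero => intro x i cur acc _ _ _; rfl
  | succ f ih =>
    intro x i cur acc hcur hi hb
    simp only [findHappyNumsLoop, findHappyNumsAltLoop]
    subst hi
    by_cases hx : (acc.length : Int) < x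
    · rw [if_pos hx, if_pos hx]
      have hlt : cur < 10000000000000 := by omega
      have htest := tests_agree cur hcur hlt
      by_cases hA : (PySem.List.pyRange 0 20 1).foldl (fun c _ => happyIterate c) cur = 1
      · rw [if_pos hA, if_pos (htest.mp hA)]
        apply ih
        · omega
        · simp
        · omega
      · rw [if_neg hA, if_neg (fun hB => hA (htest.mpr hB))]
        apply ih
        · omega
        · rfl
        · omega
    · rw [if_neg hx, if_neg hx]

-- ===== VERDICT (by name: the statement is the Claim_ definition above) =====
theorem findHappyNums_spec : Claim_equal_findHappyNums := by
  intro x hx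
  have hx' : x ≤ 2147483648 := by
    unfold Dom_findHappyNums pvDomInt at hx
    exact (of_decide_eq_true hx).2
  have hxn : x.toNat ≤ 2147483648 := by omega
  unfold Spec_findHappyNums findHappyNums findHappyNums_alt
  exact loops_eq _ x 0 1 [] (by norm_num) (by simp) (by omega)
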